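-- pv_equiv track=rewrite | github.com/shihhsinwang0214/SCHull | SCHull.py | get_recover_adj
-- ===== SOURCE A (Python) =====
-- def get_recover_adj(
--                     adj_list,
--                     shell_data_proj_id_rcrd):
--     # step one
--     recover_adj_list_1 = {}
--     for key in adj_list:
--         recover_key = shell_data_proj_id_rcrd[key]
--         for k in range(len(recover_key)):
--             recover_adj_list_1[recover_key[k]] = adj_list[key]
--
--     recover_adj_list_2 = {}
--     for key in recover_adj_list_1:
--         lst = recover_adj_list_1[key]
--         temp = []
--         for k in range(len(lst)):
--             temp += shell_data_proj_id_rcrd[lst[k]]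
--         temp.sort()
--         recover_adj_list_2[key] = temp
--
--     recover_adj_list_2 = dict(sorted(recover_adj_list_2.items()))
--     # for key in recover_adj_list_2:
--     #     recover_adj_list_2[key].sort()
--     return recover_adj_list_2
-- ===== SOURCE B (Python) =====
-- def get_recover_adj(adj_list,
--                     shell_data_proj_id_rcrd):
--     # One pass records, per remapped target, only the OWNING source key (last write
--     # wins); expansion is computed lazily, once per surviving owner, with a cache,
--     # and the result is built directly in sorted target order (no final sort pass).
--     owner = {}
--     for key in adj_list:
--         for t in shell_data_proj_id_rcrd[key]:
--             owner[t] = key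
--     cache = {}
--     result = {}
--     for t in sorted(owner):
--         k = owner[t]
--         if k not in cache:
--             cache[k] = sorted(x for n in adj_list[k]
--                                 for x in shell_data_proj_id_rcrd[n])
--         result[t] = cache[k]
--     return result
-- ===== Notes on version B (the rewrite author's own statement) =====
-- stated objective: alternative
-- what changed: B records only the owning source key per remapped target (a dict of keys, not of neighbour lists), expands each surviving owner's neighbourhood lazily and at most once via a cache, and builds the result directly in ascending target order, dropping A's intermediate list-valued dict and the final dict(sorted(...)) pass; it raises exactly where A raises.
import Mathlib
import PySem

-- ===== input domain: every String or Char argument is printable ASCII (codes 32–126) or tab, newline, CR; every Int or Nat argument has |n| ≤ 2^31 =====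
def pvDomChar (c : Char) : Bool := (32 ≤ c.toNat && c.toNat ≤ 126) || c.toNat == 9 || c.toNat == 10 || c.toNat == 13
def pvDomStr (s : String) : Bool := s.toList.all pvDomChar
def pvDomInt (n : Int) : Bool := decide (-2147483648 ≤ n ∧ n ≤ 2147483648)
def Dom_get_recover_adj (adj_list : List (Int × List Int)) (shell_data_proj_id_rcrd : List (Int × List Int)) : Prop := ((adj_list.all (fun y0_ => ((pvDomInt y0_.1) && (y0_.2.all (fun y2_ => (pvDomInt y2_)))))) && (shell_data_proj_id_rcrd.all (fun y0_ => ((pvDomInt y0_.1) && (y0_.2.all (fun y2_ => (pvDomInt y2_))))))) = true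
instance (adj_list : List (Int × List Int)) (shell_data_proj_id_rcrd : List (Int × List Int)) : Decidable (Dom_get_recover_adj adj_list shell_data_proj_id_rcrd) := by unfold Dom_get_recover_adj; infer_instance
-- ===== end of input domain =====

-- B keeps one owner key per remapped target, expands once per owner with a cache, and emits in sorted target order; alternative decomposition, same result.


-- ===== PORT A =====
-- dict(sorted(d.items())): keys are distinct, so Python's tuple comparison never reaches the
-- second component; a stable sort by the key alone is exact here.
def get_recover_adj (adj_list : List (Int × List Int)) (shell_data_proj_id_rcrd : List (Int × List Int)) : List (Int × List Int) :=
  let adj := PySem.Dict.ofList adj_list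
  let shell := PySem.Dict.ofList shell_data_proj_id_rcrd
  -- step one
  let r1 := adj.items.foldl (fun r1 kv =>
      let recover_key := shell.getD kv.1 []
      recover_key.foldl (fun r1 rk => r1.insert rk (adj.getD kv.1 [])) r1)
    PySem.Dict.empty
  let r2 := r1.items.foldl (fun r2 kv =>
      let temp := kv.2.foldl (fun t n => t ++ shell.getD n []) []
      r2.insert kv.1 (PySem.List.sorted temp (fun x => x) false))
    PySem.Dict.empty
  PySem.List.sorted r2.items (fun kv => kv.1) false

-- ===== PORT B =====
def get_recover_adj_alt (adj_list : List (Int × List Int)) (shell_data_proj_id_rcrd : List (Int × List Int)) : List (Int × List Int) :=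
  let adj := PySem.Dict.ofList adj_list
  let shell := PySem.Dict.ofList shell_data_proj_id_rcrd
  let owner := adj.items.foldl (fun ow kv =>
      (shell.getD kv.1 []).foldl (fun ow t => ow.insert t kv.1) ow)
    (PySem.Dict.empty : PySem.Dict Int Int)
  let fin := (PySem.List.sorted owner.keys (fun x => x) false).foldl
      (fun (p : PySem.Dict Int (List Int) × PySem.Dict Int (List Int)) t =>
        let k := owner.getD t 0
        let cache := if p.1.contains k then p.1 else
          p.1.insert k (PySem.List.sorted (((adj.getD k []).map (fun n => shell.getD n [])).flatten) (fun x => x) false)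
        (cache, p.2.insert t (cache.getD k [])))
      (PySem.Dict.empty, PySem.Dict.empty)
  fin.2.items

-- ===== PRECONDITION & SPEC =====
-- Pre_ excludes exactly the inputs on which A raises KeyError: an adj_list key missing from
-- shell_data_proj_id_rcrd, or a missing neighbour of an adj_list key that owns at least one
-- surviving remapped target (one not overwritten by any later key); B raises there too.
def Pre_get_recover_adj (adj_list : List (Int × List Int)) (shell_data_proj_id_rcrd : List (Int × List Int)) : Prop :=
  let items := (PySem.Dict.ofList adj_list : PySem.Dict Int (List Int)).items
  let shell := (PySem.Dict.ofList shell_data_proj_id_rcrd : PySem.Dict Int (List Int))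
  (∀ kv ∈ items, shell.contains kv.1 = true) ∧
  (∀ i, i < items.length →
    (∃ t ∈ shell.getD (items.getD i (0, [])).1 [],
      ∀ j, j < items.length → i < j → t ∉ shell.getD (items.getD j (0, [])).1 []) →
    ∀ n ∈ (items.getD i (0, [])).2, shell.contains n = true)
instance (adj_list : List (Int × List Int)) (shell_data_proj_id_rcrd : List (Int × List Int)) : Decidable (Pre_get_recover_adj adj_list shell_data_proj_id_rcrd) := by unfold Pre_get_recover_adj; infer_instance
def pvWitness_get_recover_adj : (List (Int × List Int)) × (List (Int × List Int)) := ([(0, [1])], [(0, [2]), (1, [3])])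
def Spec_get_recover_adj (adj_list : List (Int × List Int)) (shell_data_proj_id_rcrd : List (Int × List Int)) (out : List (Int × List Int)) : Prop := out = get_recover_adj_alt adj_list shell_data_proj_id_rcrd
instance (adj_list : List (Int × List Int)) (shell_data_proj_id_rcrd : List (Int × List Int)) (out : List (Int × List Int)) : Decidable (Spec_get_recover_adj adj_list shell_data_proj_id_rcrd out) := by unfold Spec_get_recover_adj; infer_instance

-- ===== CLAIM (what is proved, stated in full; the proofs are below) =====
def Claim_equal_get_recover_adj : Prop := ∀ (adj_list : List (Int × List Int)) (shell_data_proj_id_rcrd : List (Int × List Int)), Dom_get_recover_adj adj_list shell_data_proj_id_rcrd → Pre_get_recover_adj adj_list shell_data_proj_id_rcrd → Spec_get_recover_adj adj_list shell_data_proj_id_rcrd (get_recover_adj adj_list shell_data_proj_id_rcrd)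

-- ===== LEMMAS AND PROOFS =====

-- get? after an inner loop that writes the same value v at every key of ts
theorem pv_get?_inner {β : Type} (ts : List Int) (v : β) (d : PySem.Dict Int β) (k : Int) :
    (ts.foldl (fun d t => d.insert t v) d).get? k =
      if k ∈ ts then some v else d.get? k := by
  induction ts generalizing d with
  | nil => simp
  | cons t ts ih =>
    simp only [List.foldl_cons, ih, List.mem_cons]
    by_cases hk : k ∈ ts
    · simp [hk]
    · by_cases he : k = t <;> simp [hk, he, PySem.Dict.get?_insert_self, PySem.Dict.get?_insert_of_ne]

-- keys stay Nodup through the nested insert loops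
theorem pv_nodup_nested {β : Type} (L : List (Int × List Int)) (ts : Int → List Int)
    (val : (Int × List Int) → β) (d : PySem.Dict Int β) (h : d.keys.Nodup) :
    (L.foldl (fun d kv => (ts kv.1).foldl (fun d t => d.insert t (val kv)) d) d).keys.Nodup := by
  induction L generalizing d with
  | nil => exact h
  | cons kv L ih => exact ih _ (PySem.Dict.nodup_keys_foldl_insert _ (fun _ _ => val kv) _ h)

-- two nested loops writing g kv resp. f kv at the same targets stay pointwise related by F
theorem pv_get?_phase {β γ : Type} (L : List (Int × List Int)) (ts : Int → List Int)
    (f : (Int × List Int) → β) (g : (Int × List Int) → γ) (F : β → γ)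
    (hfg : ∀ kv ∈ L, g kv = F (f kv))
    (d1 : PySem.Dict Int β) (d2 : PySem.Dict Int γ)
    (hrel : ∀ k, d2.get? k = (d1.get? k).map F) (k : Int) :
    (L.foldl (fun d kv => (ts kv.1).foldl (fun d t => d.insert t (g kv)) d) d2).get? k =
      ((L.foldl (fun d kv => (ts kv.1).foldl (fun d t => d.insert t (f kv)) d) d1).get? k).map F := by
  induction L generalizing d1 d2 with
  | nil => exact hrel k
  | cons kv L ih =>
    refine ih (fun kv' h' => hfg kv' (List.mem_cons_of_mem _ h')) _ _ (fun k => ?_)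
    rw [pv_get?_inner, pv_get?_inner]
    by_cases hk : k ∈ ts kv.1
    · simp [hk, hfg kv (List.mem_cons_self)]
    · simp [hk, hrel k]

-- B's paired cache/result loop over fresh distinct targets appends (t, val (key t)) in order
theorem pv_pair_fold (ts : List Int) (key : Int → Int) (val : Int → List Int)
    (cache result : PySem.Dict Int (List Int))
    (hts : ts.Nodup) (hfresh : ∀ t ∈ ts, result.contains t = false)
    (hcache : ∀ k v, cache.get? k = some v → v = val k) :
    (ts.foldl (fun (p : PySem.Dict Int (List Int) × PySem.Dict Int (List Int)) t =>
        let k := key t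
        let c := if p.1.contains k then p.1 else p.1.insert k (val k)
        (c, p.2.insert t (c.getD k []))) (cache, result)).2.items =
      result.items ++ ts.map (fun t => (t, val (key t))) := by
  induction ts generalizing cache result with
  | nil => simp
  | cons t ts ih =>
    simp only [List.foldl_cons, List.nodup_cons] at hts ⊢
    set k := key t with hk
    set c : PySem.Dict Int (List Int) :=
      if cache.contains k then cache else cache.insert k (val k) with hc
    have hcval : c.getD k [] = val k := by
      by_cases h : cache.contains k = true
      · have hs : (cache.get? k).isSome = true := by
          rw [← PySem.Dict.contains_eq_isSome_get? cache k]; exact h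
        rcases Option.isSome_iff_exists.1 hs with ⟨v, hv⟩
        rw [hc, if_pos h, PySem.Dict.getD_of_get?_eq_some _ _ hv, hcache k v hv]
      · rw [hc, if_neg h, PySem.Dict.getD_insert_self]
    have hcinv : ∀ k' v, c.get? k' = some v → v = val k' := by
      intro k' v hv
      by_cases h : cache.contains k = true
      · rw [hc, if_pos h] at hv; exact hcache k' v hv
      · rw [hc, if_neg h, PySem.Dict.get?_insert] at hv
        by_cases he : k' = k
        · rw [if_pos he] at hv; rw [he]; exact (Option.some_inj.1 hv).symm
        · rw [if_neg he] at hv; exact hcache k' v hv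
    have hresit : (result.insert t (c.getD k [])).items = result.items ++ [(t, val k)] := by
      rw [hcval, PySem.Dict.items_insert_of_not_contains result (val k) (hfresh t List.mem_cons_self)]
    have hfresh' : ∀ t' ∈ ts, (result.insert t (c.getD k [])).contains t' = false := by
      intro t' ht'
      rw [PySem.Dict.contains_insert]
      have : (t' == t) = false := beq_eq_false_iff_ne.2 (fun he => hts.1 (he ▸ ht'))
      rw [this, hfresh t' (List.mem_cons_of_mem _ ht'), Bool.false_or]
    rw [ih c _ hts.2 hfresh' hcinv, hresit, List.map_cons, List.append_assoc, List.singleton_append]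

-- Pairwise ≤ plus Nodup gives Pairwise <
theorem pv_pairwise_lt_int (l : List Int) (h1 : l.Pairwise (· ≤ ·)) (h2 : l.Nodup) :
    l.Pairwise (· < ·) := by
  induction l with
  | nil => exact List.Pairwise.nil
  | cons x l ih =>
    simp only [List.pairwise_cons] at h1 ⊢
    simp only [List.nodup_cons] at h2
    exact ⟨fun b hb => lt_of_le_of_ne (h1.1 b hb) (fun he => h2.1 (he ▸ hb)),
           ih h1.2 h2.2⟩

-- main equality of the two ports (holds for every input of the ports; Pre_ marks where A's
-- Python actually returns)
theorem pv_ports_eq (adj_list shell_l : List (Int × List Int)) :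
    get_recover_adj adj_list shell_l = get_recover_adj_alt adj_list shell_l := by
  unfold get_recover_adj get_recover_adj_alt
  set adj : PySem.Dict Int (List Int) := PySem.Dict.ofList adj_list with hadj
  set shell : PySem.Dict Int (List Int) := PySem.Dict.ofList shell_l with hshell
  simp only []
  set F : Int → List Int := fun k => adj.getD k [] with hF
  set E : List Int → List Int :=
    fun v => PySem.List.sorted ((v.map (fun n => shell.getD n [])).flatten) (fun x => x) false with hE
  have hadjnd : adj.keys.Nodup := PySem.Dict.nodup_keys_ofList adj_list
  -- A's step one, with adj_list[key] rewritten to the item's own value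
  have hA1 :
      adj.items.foldl (fun r1 kv =>
          (shell.getD kv.1 []).foldl (fun r1 rk => r1.insert rk (adj.getD kv.1 [])) r1)
        PySem.Dict.empty =
      adj.items.foldl (fun r1 kv =>
          (shell.getD kv.1 []).foldl (fun r1 rk => r1.insert rk kv.2) r1)
        PySem.Dict.empty := by
    refine PySem.List.foldl_congr_mem _ _ _ _ (fun d kv hkv => ?_)
    have hm : (kv.1, kv.2) ∈ adj.items := by simpa using hkv
    rw [PySem.Dict.getD_of_mem_items adj hm hadjnd []]
  rw [hA1]
  set r1 : PySem.Dict Int (List Int) :=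
    adj.items.foldl (fun r1 kv =>
        (shell.getD kv.1 []).foldl (fun r1 rk => r1.insert rk kv.2) r1)
      PySem.Dict.empty with hr1
  set owner : PySem.Dict Int Int :=
    adj.items.foldl (fun ow kv =>
        (shell.getD kv.1 []).foldl (fun ow t => ow.insert t kv.1) ow)
      PySem.Dict.empty with howner
  -- pointwise relation: r1 stores the neighbour list of the key owner stores
  have hro : ∀ t, r1.get? t = (owner.get? t).map F := by
    intro t
    refine pv_get?_phase adj.items (fun k => shell.getD k []) (fun kv => kv.1) (fun kv => kv.2)
      F (fun kv hkv => ?_) PySem.Dict.empty PySem.Dict.empty (fun k => by simp [pysem]) t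
    have hm : (kv.1, kv.2) ∈ adj.items := by simpa using hkv
    show kv.2 = adj.getD kv.1 []
    exact (PySem.Dict.getD_of_mem_items adj hm hadjnd []).symm
  have hempnd : (PySem.Dict.empty : PySem.Dict Int (List Int)).keys.Nodup := by decide
  have hempnd' : (PySem.Dict.empty : PySem.Dict Int Int).keys.Nodup := by decide
  have hr1nd : r1.keys.Nodup :=
    pv_nodup_nested adj.items (fun k => shell.getD k []) (fun kv => kv.2) PySem.Dict.empty hempnd
  have hownd : owner.keys.Nodup :=
    pv_nodup_nested adj.items (fun k => shell.getD k []) (fun kv => kv.1) PySem.Dict.empty hempnd'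
  -- A's step two is a value-map over r1.items
  set r2 : PySem.Dict Int (List Int) :=
    r1.items.foldl (fun r2 kv =>
        r2.insert kv.1 (PySem.List.sorted (kv.2.foldl (fun t n => t ++ shell.getD n []) []) (fun x => x) false))
      PySem.Dict.empty with hr2
  have hr2items : r2.items = r1.items.map (fun kv => (kv.1, E kv.2)) := by
    rw [hr2]
    have := PySem.Dict.items_foldl_insert_fresh (l := r1.items) (d := PySem.Dict.empty)
      (k := fun kv => kv.1)
      (v := fun kv => PySem.List.sorted (kv.2.foldl (fun t n => t ++ shell.getD n []) []) (fun x => x) false)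
      (by intro a _; simp [PySem.Dict.contains_empty]) hr1nd
    rw [this]
    have hemp : (PySem.Dict.empty : PySem.Dict Int (List Int)).items = [] := rfl
    rw [hemp, List.nil_append]
    refine List.map_congr_left (fun kv _ => ?_)
    simp only [hE]
    rw [PySem.List.foldl_append_eq_flatMap, List.nil_append, List.flatMap_def]
  -- B's paired loop over the sorted distinct targets
  set ts : List Int := PySem.List.sorted owner.keys (fun x => x) false with hts
  have htsnd : ts.Nodup := (PySem.List.sorted_perm owner.keys (fun x => x) false).nodup_iff.2 hownd
  have hBitems :
      (ts.foldl (fun (p : PySem.Dict Int (List Int) × PySem.Dict Int (List Int)) t =>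
          let k := owner.getD t 0
          let c := if p.1.contains k then p.1 else p.1.insert k (E (F k))
          (c, p.2.insert t (c.getD k []))) (PySem.Dict.empty, PySem.Dict.empty)).2.items =
        ts.map (fun t => (t, E (F (owner.getD t 0)))) := by
    have := pv_pair_fold ts (fun t => owner.getD t 0) (fun k => E (F k))
      PySem.Dict.empty PySem.Dict.empty htsnd
      (fun t _ => by simp [pysem]) (fun k v hv => by simp [pysem] at hv)
    simpa using this
  -- the value B emits at a target t ∈ ts is E of r1's entry at t
  have hval : ∀ t ∈ ts, E (F (owner.getD t 0)) = E (r1.getD t []) := by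
    intro t ht
    have htk : t ∈ owner.keys := (PySem.List.mem_sorted owner.keys (fun x => x) false t).1 ht
    rcases Option.ne_none_iff_exists'.1
      (fun hn => ((PySem.Dict.get?_eq_none_iff_not_mem_keys owner t).1 hn) htk) with ⟨k0, hk0⟩
    have h1 : owner.getD t 0 = k0 := PySem.Dict.getD_of_get?_eq_some _ _ hk0
    have h2 : r1.get? t = some (F k0) := by rw [hro t, hk0]; rfl
    rw [h1, PySem.Dict.getD_of_get?_eq_some _ _ h2]
  -- A's output is the same map over r1.keys, sorted
  have hr1items : r2.items = r1.keys.map (fun t => (t, E (r1.getD t []))) := by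
    rw [hr2items, PySem.Dict.items_eq_map_keys r1 hr1nd [], List.map_map]
    rfl
  -- the key sets agree
  have hkeysperm : ts.Perm r1.keys := by
    refine (PySem.List.sorted_perm owner.keys (fun x => x) false).trans ?_
    rw [List.perm_ext_iff_of_nodup hownd hr1nd]
    intro k
    constructor <;> intro hk <;> by_contra hn
    · exact (PySem.Dict.get?_eq_none_iff_not_mem_keys owner k).1
        (by have := hro k; rw [(PySem.Dict.get?_eq_none_iff_not_mem_keys r1 k).2 hn] at this
            exact Option.map_eq_none_iff.1 this.symm) hk
    · exact (PySem.Dict.get?_eq_none_iff_not_mem_keys r1 k).1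
        (by rw [hro k, (PySem.Dict.get?_eq_none_iff_not_mem_keys owner k).2 hn]; rfl) hk
  have hBmap : ts.map (fun t => (t, E (F (owner.getD t 0)))) =
      ts.map (fun t => (t, E (r1.getD t []))) :=
    List.map_congr_left (fun t ht => by rw [hval t ht])
  have hperm : (ts.map (fun t => (t, E (r1.getD t [])))).Perm r2.items := by
    rw [hr1items]; exact hkeysperm.map _
  have hlt : (ts.map (fun t => (t, E (r1.getD t [])))).Pairwise
      (fun a b : Int × List Int => a.1 < b.1) := by
    refine List.Pairwise.map _ (fun a b h => h) ?_
    exact pv_pairwise_lt_int ts (PySem.List.sorted_pairwise owner.keys (fun x => x)) htsnd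
  rw [hBitems, hBmap]
  exact PySem.List.sorted_eq_of_perm_of_pairwise_lt r2.items _ _ hperm hlt

-- ===== VERDICT (by name: the statement is the Claim_ definition above) =====
theorem get_recover_adj_spec : Claim_equal_get_recover_adj := by
  intro adj_list shell _ _
  unfold Spec_get_recover_adj
  exact pv_ports_eq adj_list shell
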